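-- pv_equiv track=rewrite | github.com/chrzhang/abc | adventOfCode/2018/solutions.py | make_lookup
-- ===== SOURCE A (Python) =====
-- from collections import Counter, defaultdict, deque, namedtuple
--
-- def make_lookup(path):
--     lookup = {}
--     my_stack = deque()
--     for idx, tok in enumerate(path):
--         if tok == ')':
--             branches = []
--             while path[my_stack[-1]] == '|':
--                 branches.append(my_stack[-1])
--                 my_stack.pop()
--             lookup[my_stack.pop()] = (branches, idx)
--         elif tok in '|(':
--             my_stack.append(idx)
--     return lookup
-- ===== SOURCE B (Python) =====
-- def make_lookup(path):
--     lookup = {}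
--     frames = []
--     for idx, tok in enumerate(path):
--         if tok == '(':
--             frames.append((idx, []))
--         elif tok == '|':
--             if frames:
--                 frames[-1][1].append(idx)
--         elif tok == ')':
--             open_idx, branches = frames.pop()
--             lookup[open_idx] = (branches[::-1], idx)
--     return lookup
-- ===== Notes on version B (the rewrite author's own statement) =====
-- stated objective: simpler
-- what changed: Replaces A's flat index stack (holding '(' and '|' positions, rescanned backwards by an inner while-loop on every ')') with a stack of (open_idx, branches) frames, so each '|' is filed directly into its group's frame and closing a group is a single pop with no inner scan.
import Mathlib
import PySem

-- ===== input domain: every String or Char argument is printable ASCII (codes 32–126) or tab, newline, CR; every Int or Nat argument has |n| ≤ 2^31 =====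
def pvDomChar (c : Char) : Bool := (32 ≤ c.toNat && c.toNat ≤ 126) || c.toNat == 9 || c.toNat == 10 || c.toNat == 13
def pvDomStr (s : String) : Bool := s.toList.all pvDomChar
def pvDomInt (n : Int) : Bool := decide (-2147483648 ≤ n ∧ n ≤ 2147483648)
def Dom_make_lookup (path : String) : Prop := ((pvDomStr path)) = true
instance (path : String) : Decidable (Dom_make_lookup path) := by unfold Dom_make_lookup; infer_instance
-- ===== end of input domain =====

-- B replaces A's flat index stack (scanned backwards by an inner while-loop at each ')')
-- with a stack of (open_idx, branches) frames, so closing a group is a single pop: objective 'simpler'.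

-- ===== PORT A =====
-- inner `while path[my_stack[-1]] == '|': branches.append(my_stack[-1]); my_stack.pop()` loop;
-- the stack's top is the list head.  Returns (branches, remaining stack).  Python raises
-- IndexError when the stack empties mid-loop; that ([]) case is excluded by Pre_make_lookup.
def pvPopBars (chars : List Char) : List Int → List Int × List Int
  | [] => ([], [])
  | t :: rest =>
    if PySem.List.pyGet? chars t = some '|' then
      let r := pvPopBars chars rest
      (t :: r.1, r.2)
    else ([], t :: rest)

-- one iteration of A's `for idx, tok in enumerate(path)` body
def pvStepA (chars : List Char) (st : PySem.Dict Int (List Int × Int) × List Int)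
    (p : Int × Char) : PySem.Dict Int (List Int × Int) × List Int :=
  if p.2 = ')' then
    let r := pvPopBars chars st.2
    match r.2 with
    | [] => (st.1, [])                      -- Python: IndexError here (outside Pre_make_lookup)
    | o :: rest => (st.1.insert o (r.1, p.1), rest)
  else if p.2 = '|' ∨ p.2 = '(' then        -- `tok in '|('`
    (st.1, p.1 :: st.2)
  else st

def make_lookup (path : String) : List (Int × List Int × Int) :=
  ((PySem.List.enumerate path.toList 0).foldl (pvStepA path.toList)
    (PySem.Dict.empty, ([] : List Int))).1.items

-- ===== PORT B =====
-- one iteration of B's loop; frames is the stack of (open_idx, branches), top = head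
def pvStepB (st : PySem.Dict Int (List Int × Int) × List (Int × List Int))
    (p : Int × Char) : PySem.Dict Int (List Int × Int) × List (Int × List Int) :=
  if p.2 = '(' then (st.1, (p.1, ([] : List Int)) :: st.2)
  else if p.2 = '|' then
    match st.2 with
    | [] => st                              -- `if frames:` false — top-level '|' ignored
    | (o, bs) :: rest => (st.1, (o, bs ++ [p.1]) :: rest)
  else if p.2 = ')' then
    match st.2 with
    | [] => st                              -- Python: IndexError here (outside Pre_make_lookup)
    | (o, bs) :: rest => (st.1.insert o (bs.reverse, p.1), rest)   -- branches[::-1] = reverse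
  else st

def make_lookup_alt (path : String) : List (Int × List Int × Int) :=
  ((PySem.List.enumerate path.toList 0).foldl pvStepB
    (PySem.Dict.empty, ([] : List (Int × List Int)))).1.items

-- ===== PRECONDITION & SPEC =====
-- Pre_ excludes exactly the inputs on which Python A raises IndexError: those with a prefix
-- containing more ')' than '(' (an unmatched ')').
def Pre_make_lookup (path : String) : Prop :=
  ∀ k ∈ List.range (path.toList.length + 1),
    (path.toList.take k).count ')' ≤ (path.toList.take k).count '('
instance (path : String) : Decidable (Pre_make_lookup path) := by
  unfold Pre_make_lookup; infer_instance

def pvWitness_make_lookup : String := "ab(cd|e(f|)|)x"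

def Spec_make_lookup (path : String) (out : List (Int × List Int × Int)) : Prop := out = make_lookup_alt path
instance (path : String) (out : List (Int × List Int × Int)) : Decidable (Spec_make_lookup path out) := by unfold Spec_make_lookup; infer_instance

-- ===== CLAIM (what is proved, stated in full; the proofs are below) =====
def Claim_equal_make_lookup : Prop := ∀ (path : String), Dom_make_lookup path → Pre_make_lookup path → Spec_make_lookup path (make_lookup path)

-- ===== LEMMAS AND PROOFS =====

-- A-stack image of a frame stack: each frame contributes its bars (newest first) then its '('.
def pvFlatF (frames : List (Int × List Int)) : List Int :=
  frames.flatMap (fun f => f.2.reverse ++ [f.1])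

theorem pvPopBars_bars (chars : List Char) (l : List Int)
    (h : ∀ t ∈ l, PySem.List.pyGet? chars t = some '|') :
    pvPopBars chars l = (l, []) := by
  induction l with
  | nil => rfl
  | cons t rest ih =>
    simp only [pvPopBars, h t (List.mem_cons_self ..)]
    rw [ih (fun x hx => h x (List.mem_cons_of_mem _ hx))]
    simp
  
theorem pvPopBars_stop (chars : List Char) (l : List Int) (o : Int) (r : List Int)
    (h : ∀ t ∈ l, PySem.List.pyGet? chars t = some '|')
    (ho : PySem.List.pyGet? chars o = some '(') :
    pvPopBars chars (l ++ o :: r) = (l, o :: r) := by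
  induction l with
  | nil =>
    simp only [List.nil_append, pvPopBars, ho]
    simp
  | cons t rest ih =>
    simp only [List.cons_append, pvPopBars, h t (List.mem_cons_self ..)]
    rw [ih (fun x hx => h x (List.mem_cons_of_mem _ hx))]
    simp

-- The main invariant: the two folds keep equal lookups, A's stack being the flattened frames
-- followed by the top-level bars that B ignores.
theorem pvMain (chars : List Char) (l : List (Int × Char))
    (hl : ∀ p ∈ l, PySem.List.pyGet? chars p.1 = some p.2) :
    ∀ (lk : PySem.Dict Int (List Int × Int)) (frames : List (Int × List Int)) (topbars : List Int),
    (∀ f ∈ frames, PySem.List.pyGet? chars f.1 = some '(' ∧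
        ∀ b ∈ f.2, PySem.List.pyGet? chars b = some '|') →
    (∀ t ∈ topbars, PySem.List.pyGet? chars t = some '|') →
    (l.foldl (pvStepA chars) (lk, pvFlatF frames ++ topbars)).1 =
      (l.foldl pvStepB (lk, frames)).1 := by
  induction l with
  | nil => intro lk frames topbars _ _; rfl
  | cons p rest ih =>
    intro lk frames topbars hfr htb
    have hp : PySem.List.pyGet? chars p.1 = some p.2 := hl p (List.mem_cons_self ..)
    have hrest : ∀ q ∈ rest, PySem.List.pyGet? chars q.1 = some q.2 :=
      fun q hq => hl q (List.mem_cons_of_mem _ hq)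
    by_cases hc : p.2 = ')'
    · cases frames with
      | nil =>
        simp only [List.foldl_cons, pvStepA, pvStepB, hc, pvFlatF,
          List.flatMap_nil, List.nil_append]
        rw [pvPopBars_bars chars topbars htb]
        simp only [show (')' : Char) ≠ '(' from by decide, show (')' : Char) ≠ '|' from by decide, ite_false]
        have := ih hrest lk [] []
        simpa [pvFlatF] using this (by simp) (by simp)
      | cons f restF =>
        obtain ⟨o, bs⟩ := f
        have hfo := hfr (o, bs) (List.mem_cons_self ..)
        simp only [List.foldl_cons, pvStepA, pvStepB, hc, pvFlatF,
          List.flatMap_cons, List.append_assoc]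
        rw [show bs.reverse ++ ([o] ++ (restF.flatMap (fun f => f.2.reverse ++ [f.1]) ++ topbars))
            = bs.reverse ++ o :: (restF.flatMap (fun f => f.2.reverse ++ [f.1]) ++ topbars) by simp]
        rw [pvPopBars_stop chars bs.reverse o _ (fun t ht => hfo.2 t (by simpa using ht)) hfo.1]
        simp only [show (')' : Char) ≠ '(' from by decide, show (')' : Char) ≠ '|' from by decide, ite_false]
        exact ih hrest _ restF topbars (fun f hf => hfr f (List.mem_cons_of_mem _ hf)) htb
    · by_cases hb : p.2 = '|'
      · cases frames with
        | nil =>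
          simp only [List.foldl_cons, pvStepA, pvStepB, hb, ite_false,
            show ('|' : Char) ≠ '(' from by decide, pvFlatF,
            List.flatMap_nil, List.nil_append]
          have := ih hrest lk [] (p.1 :: topbars) (by simp)
            (by intro t ht
                rcases List.mem_cons.mp ht with h | h
                · subst h; rw [← hb]; exact hp
                · exact htb t h)
          simpa [pvFlatF] using this
        | cons f restF =>
          obtain ⟨o, bs⟩ := f
          have hfo := hfr (o, bs) (List.mem_cons_self ..)
          simp only [List.foldl_cons, pvStepA, pvStepB, hb, ite_false,
            show ('|' : Char) ≠ '(' from by decide]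
          have harr : pvFlatF ((o, bs ++ [p.1]) :: restF) ++ topbars
              = p.1 :: (pvFlatF ((o, bs) :: restF) ++ topbars) := by
            simp [pvFlatF]
          rw [show p.1 :: (pvFlatF ((o, bs) :: restF) ++ topbars)
              = pvFlatF ((o, bs ++ [p.1]) :: restF) ++ topbars from harr.symm]
          refine ih hrest lk ((o, bs ++ [p.1]) :: restF) topbars ?_ htb
          intro f hf
          rcases List.mem_cons.mp hf with h | h
          · subst h
            refine ⟨hfo.1, ?_⟩
            intro b hbm
            rcases List.mem_append.mp hbm with h2 | h2
            · exact hfo.2 b h2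
            · simp only [List.mem_singleton] at h2; subst h2; rw [← hb]; exact hp
          · exact hfr f (List.mem_cons_of_mem _ h)
      · by_cases ho : p.2 = '('
        · simp only [List.foldl_cons, pvStepA, pvStepB, ho]
          have : pvFlatF ((p.1, ([] : List Int)) :: frames) ++ topbars
              = p.1 :: (pvFlatF frames ++ topbars) := by simp [pvFlatF]
          rw [show p.1 :: (pvFlatF frames ++ topbars)
              = pvFlatF ((p.1, ([] : List Int)) :: frames) ++ topbars from this.symm]
          refine ih hrest lk ((p.1, []) :: frames) topbars ?_ htb
          intro f hf
          rcases List.mem_cons.mp hf with h | h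
          · subst h; exact ⟨by rw [← ho]; exact hp, by simp⟩
          · exact hfr f h
        · simp only [List.foldl_cons, pvStepA, pvStepB, hc, hb, ho, ite_false]
          exact ih hrest lk frames topbars hfr htb

-- ===== VERDICT (by name: the statement is the Claim_ definition above) =====
theorem make_lookup_spec : Claim_equal_make_lookup := by
  intro path _ _
  unfold Spec_make_lookup make_lookup make_lookup_alt
  have hl : ∀ p ∈ PySem.List.enumerate path.toList 0,
      PySem.List.pyGet? path.toList p.1 = some p.2 := by
    intro p hp
    obtain ⟨k, hk, hpk⟩ := (PySem.List.mem_enumerate_iff _ _ _).mp hp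
    subst hpk
    simp [PySem.List.pyGet?_natCast, List.getElem?_eq_getElem hk]
  have := pvMain path.toList (PySem.List.enumerate path.toList 0) hl
    PySem.Dict.empty [] [] (by simp) (by simp)
  simpa [pvFlatF] using congrArg PySem.Dict.items this
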